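-- pv_equiv track=rewrite | github.com/Nathandebrito/ShellSort | shellsort.py | knuth_sequence
-- ===== SOURCE A (Python) =====
-- def knuth_sequence(n):
--     sequence = []
--     gap = 1
--     while gap < n:
--         sequence.append(gap)
--         gap = 3 * gap + 1
--     sequence.reverse()
--     return sequence
-- ===== SOURCE B (Python) =====
-- def knuth_sequence(n):
--     m = 0
--     while (3 ** (m + 1) - 1) // 2 < n:
--         m += 1
--     return [(3 ** i - 1) // 2 for i in range(m, 0, -1)]
-- ===== Notes on version B (the rewrite author's own statement) =====
-- stated objective: alternative
-- what changed: Replaces the running gap recurrence with append-then-reverse by first counting how many Knuth gaps lie below n and then emitting each gap from its closed form directly in descending order, with no reverse step.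
import Mathlib
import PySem

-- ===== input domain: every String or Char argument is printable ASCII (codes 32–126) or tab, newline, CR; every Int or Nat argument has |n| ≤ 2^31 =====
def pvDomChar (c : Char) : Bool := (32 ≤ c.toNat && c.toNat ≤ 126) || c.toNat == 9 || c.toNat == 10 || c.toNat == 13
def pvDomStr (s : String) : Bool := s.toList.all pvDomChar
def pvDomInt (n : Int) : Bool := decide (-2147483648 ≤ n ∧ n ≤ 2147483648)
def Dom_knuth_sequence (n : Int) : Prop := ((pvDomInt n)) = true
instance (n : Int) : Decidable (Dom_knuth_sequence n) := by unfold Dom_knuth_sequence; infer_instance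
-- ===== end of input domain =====

-- B computes the count m of Knuth gaps below n and emits the closed form (3^i-1)//2
-- directly in descending order (no running recurrence, no reverse step).

-- ===== PORT A =====
-- the while loop; gap starts at 1 and stays a positive integer, so it is carried as a Nat.
-- The fuel argument is only a totality guard: the loop runs fewer than n.toNat + 1 times
-- (the gap grows strictly and stays below n while looping), so the fuel never runs out.
def knuthGo (fuel : Nat) (n : Int) (gap : Nat) (seq : List Int) : List Int :=
  match fuel with
  | 0 => seq
  | fuel + 1 =>
    if (gap : Int) < n then knuthGo fuel n (3 * gap + 1) (seq ++ [(gap : Int)]) else seq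

def knuth_sequence (n : Int) : List Int := (knuthGo n.toNat n 1 []).reverse

-- ===== PORT B =====
-- the m-search loop of Source B; fuel is the same totality guard (m stays below n.toNat)
def altGo (fuel : Nat) (n : Int) (k : Nat) : Nat :=
  match fuel with
  | 0 => k
  | fuel + 1 =>
    if PySem.Int.floordiv (3 ^ (k + 1) - 1) 2 < n then altGo fuel n (k + 1) else k

-- [(3**i - 1) // 2 for i in range(m, 0, -1)]: range(m,0,-1) enumerates m,…,1,
-- i.e. (List.range m).reverse shifted by one in the exponent
def knuth_sequence_alt (n : Int) : List Int :=
  let m := altGo n.toNat n 0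
  (List.range m).reverse.map (fun i => PySem.Int.floordiv (3 ^ (i + 1) - 1) 2)

-- ===== PRECONDITION & SPEC =====
def Spec_knuth_sequence (n : Int) (out : List Int) : Prop := out = knuth_sequence_alt n
instance (n : Int) (out : List Int) : Decidable (Spec_knuth_sequence n out) := by unfold Spec_knuth_sequence; infer_instance

-- ===== CLAIM (what is proved, stated in full; the proofs are below) =====
def Claim_equal_knuth_sequence : Prop := ∀ (n : Int), Dom_knuth_sequence n → Spec_knuth_sequence n (knuth_sequence n)

-- ===== LEMMAS AND PROOFS =====
-- gkN k is the k-th Knuth gap (3^(k+1)-1)/2, exact in Nat arithmetic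
def gkN (k : Nat) : Nat := (3 ^ (k + 1) - 1) / 2

theorem gkN_odd (k : Nat) : 2 * gkN k + 1 = 3 ^ (k + 1) := by
  have h : 3 ^ (k + 1) % 2 = 1 := by rw [Nat.pow_mod]; norm_num
  have h1 : 1 ≤ 3 ^ (k + 1) := Nat.one_le_pow _ _ (by norm_num)
  unfold gkN; omega

theorem gkN_succ (k : Nat) : gkN (k + 1) = 3 * gkN k + 1 := by
  have a := gkN_odd k
  have b := gkN_odd (k + 1)
  have h3 : (3 : Nat) ^ (k + 1 + 1) = 3 * 3 ^ (k + 1) := by ring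
  omega

theorem gkN_cast (k : Nat) :
    ((gkN k : Nat) : Int) = PySem.Int.floordiv (3 ^ (k + 1) - 1) 2 := by
  have h := gkN_odd k
  rw [PySem.Int.floordiv_eq_ediv_of_pos (by norm_num)]
  have hc : ((3 : Int) ^ (k + 1)) = ((3 ^ (k + 1) : Nat) : Int) := by push_cast; ring
  rw [hc]
  omega

theorem altGo_ge (fuel : Nat) (n : Int) (k : Nat) : k ≤ altGo fuel n k := by
  induction fuel generalizing k with
  | zero => simp [altGo]
  | succ fuel ih =>
    rw [altGo]
    split
    · exact le_trans (Nat.le_succ k) (ih (k + 1))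
    · exact le_refl k

theorem go_spec (fuel : Nat) (n : Int) (k : Nat) (seq : List Int) :
    knuthGo fuel n (gkN k) seq =
      seq ++ (List.range' k (altGo fuel n k - k)).map (fun i => ((gkN i : Nat) : Int)) := by
  induction fuel generalizing k seq with
  | zero => simp [knuthGo, altGo]
  | succ fuel ih =>
    rw [knuthGo, altGo]
    by_cases h : PySem.Int.floordiv (3 ^ (k + 1) - 1) 2 < n
    · rw [if_pos (by rw [gkN_cast]; exact h), if_pos h]
      have hstep : 3 * gkN k + 1 = gkN (k + 1) := (gkN_succ k).symm
      rw [hstep, ih]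
      have hge := altGo_ge fuel n (k + 1)
      have hd : altGo fuel n (k + 1) - k = (altGo fuel n (k + 1) - (k + 1)) + 1 := by omega
      rw [hd, List.range'_succ, List.map_cons, List.append_assoc]
      rfl
    · rw [if_neg (by rw [gkN_cast]; exact h), if_neg h]
      simp

-- ===== VERDICT (by name: the statement is the Claim_ definition above) =====
theorem knuth_sequence_spec : Claim_equal_knuth_sequence := by
  intro n _
  unfold Spec_knuth_sequence knuth_sequence knuth_sequence_alt
  have h0 : (1 : Nat) = gkN 0 := by decide
  rw [h0, go_spec n.toNat n 0 []]
  simp only [Nat.sub_zero, List.nil_append, ← List.range_eq_range', ← List.map_reverse]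
  congr 1
  funext i
  exact gkN_cast i
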